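-- pv_equiv track=rewrite | github.com/kleenex1/TIL | 코테의민족/0903/01.py | solution
-- ===== SOURCE A (Python) =====
-- from collections import defaultdict
--
-- def solution(id_list, report, k):
--     answer = []
--     report = list(set(report))
--     user = defaultdict(set)
--     cnt = defaultdict(int)
--
--     for i in report:
--         a,b = i.split()
--         user[a].add(b)
--         cnt[b] += 1
--
--     for i in id_list:
--         result = 0
--         for j in user[i]:
--             if cnt[j] >= k:
--                 result += 1
--         answer.append(result)
--
--     return answer
-- ===== SOURCE B (Python) =====
-- def solution(id_list, report, k):
--     # One pass over the deduplicated reports builds cnt (reported -> #distinct report strings)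
--     # and the set of (reporter, reported) pairs; a single inverted pass over the pairs then
--     # accumulates each reporter's answer into a dict, read off per id (0 if absent).
--     cnt = {}
--     pairs = set()
--     for r in set(report):
--         a, b = r.split()
--         cnt[b] = cnt.get(b, 0) + 1
--         pairs.add((a, b))
--     result = {}
--     for a, b in pairs:
--         if cnt[b] >= k:
--             result[a] = result.get(a, 0) + 1
--     return [result.get(i, 0) for i in id_list]
-- ===== Notes on version B (the rewrite author's own statement) =====
-- stated objective: alternative
-- what changed: B inverts the grouping direction: instead of A's per-id nested loop over that id's reported-set, B makes one pass over the deduplicated (reporter, reported) pairs accumulating each reporter's answer into a dict, then reads the answer list off the dict with default 0.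
import Mathlib
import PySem

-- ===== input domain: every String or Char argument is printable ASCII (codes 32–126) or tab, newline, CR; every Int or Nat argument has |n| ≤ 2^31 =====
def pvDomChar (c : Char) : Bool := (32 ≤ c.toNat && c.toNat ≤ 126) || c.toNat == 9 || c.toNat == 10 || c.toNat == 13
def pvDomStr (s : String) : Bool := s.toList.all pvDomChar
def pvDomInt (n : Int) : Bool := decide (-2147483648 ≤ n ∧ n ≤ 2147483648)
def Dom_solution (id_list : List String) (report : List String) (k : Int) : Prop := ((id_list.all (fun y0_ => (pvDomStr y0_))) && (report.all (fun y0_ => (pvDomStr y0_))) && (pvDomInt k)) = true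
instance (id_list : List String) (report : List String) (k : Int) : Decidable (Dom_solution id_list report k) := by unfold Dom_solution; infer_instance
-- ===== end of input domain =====

-- B replaces A's per-id nested scan of its reported-set by one inverted pass over the
-- deduplicated (reporter, reported) pairs that accumulates answers into a dict (alternative
-- decomposition, similar cost).

-- ===== PORT A =====
-- A-side helper: the body of A's first for-loop (user[a].add(b); cnt[b] += 1)
def pvStepA (st : PySem.Dict String (PySem.Set String) × PySem.Dict String Int)
    (i : String) : PySem.Dict String (PySem.Set String) × PySem.Dict String Int :=
  match PySem.Str.split₀ i with
  | [a, b] => (PySem.Dict.modify st.1 a PySem.Set.empty (fun s => PySem.Set.add s b),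
               PySem.Dict.modify st.2 b 0 (· + 1))
  | _ => st  -- Python raises ValueError here; excluded by Pre_solution

def solution (id_list : List String) (report : List String) (k : Int) : List Int :=
  let rep : PySem.Set String := PySem.Set.ofList report
  let st := rep.foldl pvStepA (PySem.Dict.empty, PySem.Dict.empty)
  id_list.foldl
    (fun answer i =>
      answer ++ [(PySem.Dict.getD st.1 i PySem.Set.empty).foldl
        (fun result j => if PySem.Dict.getD st.2 j 0 ≥ k then result + 1 else result) (0 : Int)])
    []

-- ===== PORT B =====
-- B-side helper: the body of B's build loop (cnt[b] = cnt.get(b,0)+1; pairs.add((a,b)))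
def pvStepB (st : PySem.Dict String Int × PySem.Set (String × String))
    (r : String) : PySem.Dict String Int × PySem.Set (String × String) :=
  match PySem.Str.split₀ r with
  | [a, b] => (PySem.Dict.insert st.1 b (PySem.Dict.getD st.1 b 0 + 1),
               PySem.Set.add st.2 (a, b))
  | _ => st  -- Python raises ValueError here; excluded by Pre_solution

def solution_alt (id_list : List String) (report : List String) (k : Int) : List Int :=
  let st := (PySem.Set.ofList report).foldl pvStepB (PySem.Dict.empty, PySem.Set.empty)
  let result := st.2.foldl
    (fun (res : PySem.Dict String Int) p =>
      if PySem.Dict.getD st.1 p.2 0 ≥ k then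
        PySem.Dict.insert res p.1 (PySem.Dict.getD res p.1 0 + 1)
      else res)
    PySem.Dict.empty
  id_list.map (fun i => PySem.Dict.getD result i 0)

-- ===== PRECONDITION & SPEC =====
-- Pre_ excludes exactly the inputs where some report string does not split into two
-- whitespace-separated tokens: there Python A raises ValueError on 'a,b = i.split()'.
def Pre_solution (id_list : List String) (report : List String) (k : Int) : Prop :=
  ∀ r ∈ report, (PySem.Str.split₀ r).length = 2
instance (id_list : List String) (report : List String) (k : Int) : Decidable (Pre_solution id_list report k) := by unfold Pre_solution; infer_instance
def pvWitness_solution : List String × List String × Int := (["muzi", "frodo"], ["muzi frodo", "apeach frodo"], 1)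

def Spec_solution (id_list : List String) (report : List String) (k : Int) (out : List Int) : Prop := out = solution_alt id_list report k
instance (id_list : List String) (report : List String) (k : Int) (out : List Int) : Decidable (Spec_solution id_list report k out) := by unfold Spec_solution; infer_instance

-- ===== CLAIM (what is proved, stated in full; the proofs are below) =====
def Claim_equal_solution : Prop := ∀ (id_list : List String) (report : List String) (k : Int), Dom_solution id_list report k → Pre_solution id_list report k → Spec_solution id_list report k (solution id_list report k)

-- ===== LEMMAS AND PROOFS =====

-- Joint invariant of the two build loops: the two count dicts agree pointwise, and A's
-- per-reporter set is exactly the seconds of B's pairs filtered to that reporter.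
theorem pv_build_inv (L : List String)
    (uA : PySem.Dict String (PySem.Set String)) (cA cB : PySem.Dict String Int)
    (P : PySem.Set (String × String))
    (hc : ∀ x, PySem.Dict.getD cA x 0 = PySem.Dict.getD cB x 0)
    (hu : ∀ a, PySem.Dict.getD uA a PySem.Set.empty
              = (P.filter (fun p => p.1 == a)).map Prod.snd) :
    (∀ x, PySem.Dict.getD (L.foldl pvStepA (uA, cA)).2 x 0
        = PySem.Dict.getD (L.foldl pvStepB (cB, P)).1 x 0) ∧
    (∀ a, PySem.Dict.getD (L.foldl pvStepA (uA, cA)).1 a PySem.Set.empty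
        = (((L.foldl pvStepB (cB, P)).2).filter (fun p => p.1 == a)).map Prod.snd) := by
  induction L generalizing uA cA cB P with
  | nil => exact ⟨hc, hu⟩
  | cons r t ih =>
    rcases hsp : PySem.Str.split₀ r with _ | ⟨a, _ | ⟨b, _ | _⟩⟩
    · simp only [List.foldl_cons, pvStepA, pvStepB, hsp]
      exact ih _ _ _ _ hc hu
    · simp only [List.foldl_cons, pvStepA, pvStepB, hsp]
      exact ih _ _ _ _ hc hu
    · simp only [List.foldl_cons, pvStepA, pvStepB, hsp]
      refine ih _ _ _ _ ?_ ?_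
      · intro x
        rw [PySem.Dict.getD_modify, PySem.Dict.getD_insert]
        by_cases hx : x = b <;> simp [hx, hc]
      · intro a'
        rw [PySem.Dict.getD_modify]
        by_cases ha : a' = a
        · subst ha
          rw [if_pos rfl, hu a']
          by_cases hmem : (a', b) ∈ P
          · have hb : b ∈ (P.filter (fun p => p.1 == a')).map Prod.snd :=
              List.mem_map.mpr ⟨(a', b), List.mem_filter.mpr ⟨hmem, by simp⟩, rfl⟩
            simp [PySem.Set.add, PySem.Set.contains, hmem, hb]
          · have hb : b ∉ (P.filter (fun p => p.1 == a')).map Prod.snd := by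
              intro hmm
              rcases List.mem_map.mp hmm with ⟨p, hp, hsnd⟩
              rcases List.mem_filter.mp hp with ⟨hpP, hfst⟩
              apply hmem
              have hpq : p = (a', b) := by
                rcases p with ⟨p1, p2⟩
                simp only [beq_iff_eq] at hfst
                simp_all
              rwa [hpq] at hpP
            simp [PySem.Set.add, PySem.Set.contains, hmem, hb, List.filter_append]
        · rw [if_neg ha, hu a']
          by_cases h1 : (a, b) ∈ P <;>
            simp [PySem.Set.add, PySem.Set.contains, h1, List.filter_append, Ne.symm ha]
    · simp only [List.foldl_cons, pvStepA, pvStepB, hsp]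
      exact ih _ _ _ _ hc hu

theorem pv_res_getD (P : List (String × String)) (cnt : PySem.Dict String Int) (k : Int)
    (res : PySem.Dict String Int) (i : String) :
    PySem.Dict.getD (P.foldl
      (fun (res : PySem.Dict String Int) p =>
        if PySem.Dict.getD cnt p.2 0 ≥ k then
          PySem.Dict.insert res p.1 (PySem.Dict.getD res p.1 0 + 1)
        else res) res) i 0
    = PySem.Dict.getD res i 0
      + ((P.filter (fun p => p.1 == i && decide (PySem.Dict.getD cnt p.2 0 ≥ k))).length : Int) := by
  induction P generalizing res with
  | nil => simp
  | cons p t ih =>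
    simp only [List.foldl_cons, List.filter_cons]
    by_cases h : PySem.Dict.getD cnt p.2 0 ≥ k
    · by_cases hi : p.1 = i
      · simp only [h, if_pos, hi, beq_self_eq_true, decide_true, Bool.and_self, ih,
          List.length_cons]
        rw [PySem.Dict.getD_insert_self]
        push_cast; ring
      · rw [if_pos h, ih, PySem.Dict.getD_insert_of_ne _ _ _ (Ne.symm hi)]
        simp [hi]
    · simp [h, ih]


theorem pv_countA (S : List String) (cnt : PySem.Dict String Int) (k : Int) (r0 : Int) :
    S.foldl (fun result j => if PySem.Dict.getD cnt j 0 ≥ k then result + 1 else result) r0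
    = r0 + ((S.filter (fun j => decide (PySem.Dict.getD cnt j 0 ≥ k))).length : Int) := by
  induction S generalizing r0 with
  | nil => simp
  | cons j t ih =>
    simp only [List.foldl_cons, List.filter_cons]
    by_cases h : PySem.Dict.getD cnt j 0 ≥ k
    · simp only [h, if_pos, decide_true, ih, List.length_cons]
      push_cast; ring
    · simp [h, ih]

-- ===== VERDICT (by name: the statement is the Claim_ definition above) =====
theorem solution_spec : Claim_equal_solution := by
  intro id_list report k _ _
  obtain ⟨hc, hu⟩ := pv_build_inv (PySem.Set.ofList report)
    PySem.Dict.empty PySem.Dict.empty PySem.Dict.empty PySem.Set.empty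
    (fun x => rfl) (fun a => by simp [PySem.Set.empty])
  simp only [Spec_solution, solution, solution_alt]
  rw [PySem.List.foldl_append_singleton_eq_map, List.nil_append]
  refine List.map_congr_left (fun i _ => ?_)
  rw [pv_countA, hu i, pv_res_getD, PySem.Dict.getD_empty]
  congr 1
  rw [← List.countP_eq_length_filter, ← List.countP_eq_length_filter,
    List.countP_map, List.countP_filter]
  congr 1
  refine List.countP_congr (fun p _ => ?_)
  simp only [Function.comp]
  rw [hc p.2, Bool.and_comm]
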